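-- pv_equiv track=rewrite | github.com/JPaehr/VokabelTrainer | oberflaechen/DrawQuery.py | cutLists
-- ===== SOURCE A (Python) =====
-- def cutLists(liste):
--     listToReturn = list()
--
--     sublist = list()
--     for i in liste:
--         if not i[0] == -1 and not i[1] == -1:
--             sublist.append(i)
--         else:
--             listToReturn.append(sublist)
--             sublist = []
--
--     return listToReturn
-- ===== SOURCE B (Python) =====
-- def cutLists(liste):
--     breaks = [i for i, p in enumerate(liste) if p[0] == -1 or p[1] == -1]
--     out = []
--     start = 0
--     for idx in breaks:
--         out.append(liste[start:idx])
--         start = idx + 1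
--     return out
-- ===== Notes on version B (the rewrite author's own statement) =====
-- stated objective: alternative
-- what changed: B first collects the break indices where a component equals -1, then emits liste[start:idx] slices between consecutive breaks (dropping the trailing segment), instead of A's element-by-element accumulation of a running sublist.
import Mathlib
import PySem

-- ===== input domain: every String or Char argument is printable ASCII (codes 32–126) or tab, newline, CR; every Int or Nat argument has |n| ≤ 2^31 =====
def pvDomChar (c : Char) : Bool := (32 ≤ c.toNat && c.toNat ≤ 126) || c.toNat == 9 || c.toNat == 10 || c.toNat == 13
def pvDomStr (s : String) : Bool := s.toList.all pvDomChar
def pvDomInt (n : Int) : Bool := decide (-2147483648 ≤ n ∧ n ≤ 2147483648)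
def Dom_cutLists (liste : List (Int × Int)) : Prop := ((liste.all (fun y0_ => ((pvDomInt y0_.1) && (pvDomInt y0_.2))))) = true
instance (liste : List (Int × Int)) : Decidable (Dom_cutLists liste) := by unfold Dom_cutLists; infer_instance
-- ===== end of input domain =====

-- B collects the break indices first and then slices between them, instead of A's running-sublist accumulation; same O(n) cost, different decomposition.


-- ===== PORT A =====
def stepA (st : List (List (Int × Int)) × List (Int × Int)) (i : Int × Int) :
    List (List (Int × Int)) × List (Int × Int) :=
  if !(i.1 == -1) && !(i.2 == -1) then (st.1, st.2 ++ [i]) else (st.1 ++ [st.2], [])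

def cutLists (liste : List (Int × Int)) : List (List (Int × Int)) :=
  (liste.foldl stepA ([], [])).1

-- ===== PORT B =====
def stepB (liste : List (Int × Int)) (st : Int × List (List (Int × Int))) (idx : Int) :
    Int × List (List (Int × Int)) :=
  (idx + 1, st.2 ++ [PySem.List.slice liste (some st.1) (some idx)])

def cutLists_alt (liste : List (Int × Int)) : List (List (Int × Int)) :=
  let breaks := ((PySem.List.enumerate liste 0).filter
      (fun p => p.2.1 == -1 || p.2.2 == -1)).map (·.1)
  (breaks.foldl (stepB liste) (0, [])).2

-- ===== PRECONDITION & SPEC =====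
def Spec_cutLists (liste : List (Int × Int)) (out : List (List (Int × Int))) : Prop := out = cutLists_alt liste
instance (liste : List (Int × Int)) (out : List (List (Int × Int))) : Decidable (Spec_cutLists liste out) := by unfold Spec_cutLists; infer_instance

-- ===== CLAIM (what is proved, stated in full; the proofs are below) =====
def Claim_equal_cutLists : Prop := ∀ (liste : List (Int × Int)), Dom_cutLists liste → Spec_cutLists liste (cutLists liste)

-- ===== LEMMAS AND PROOFS =====

-- reference split function both ports are reduced to
def gRef : List (Int × Int) → List (List (Int × Int))
  | [] => []
  | x :: xs =>
    if x.1 == -1 || x.2 == -1 then [] :: gRef xs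
    else match gRef xs with
      | [] => []
      | h :: t => (x :: h) :: t

-- prepend cur onto the head sublist (A's pending sublist)
def prep (cur : List (Int × Int)) : List (List (Int × Int)) → List (List (Int × Int))
  | [] => []
  | h :: t => (cur ++ h) :: t

lemma prep_nil (gl : List (List (Int × Int))) : prep [] gl = gl := by
  cases gl <;> simp [prep]

lemma foldlA_eq (l : List (Int × Int)) :
    ∀ out cur, (l.foldl stepA (out, cur)).1 = out ++ prep cur (gRef l) := by
  induction l with
  | nil => intro out cur; simp [gRef, prep]
  | cons x xs ih =>
    intro out cur
    by_cases hs : x.1 = -1 ∨ x.2 = -1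
    · have hc : (!(x.1 == -1) && !(x.2 == -1)) = false := by
        rcases hs with h | h <;> simp [h]
      have hg : (x.1 == -1 || x.2 == -1) = true := by
        rcases hs with h | h <;> simp [h]
      simp only [List.foldl_cons, stepA, hc, Bool.false_eq_true, if_false, ih, gRef, hg, if_true, prep, List.append_assoc]
      cases gRef xs <;> simp
    · have hx1 : ¬ x.1 = -1 := fun hh => hs (Or.inl hh)
      have hx2 : ¬ x.2 = -1 := fun hh => hs (Or.inr hh)
      have hc : (!(x.1 == -1) && !(x.2 == -1)) = true := by simp [hx1, hx2]
      have hg : (x.1 == -1 || x.2 == -1) = false := by simp [hx1, hx2]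
      simp only [List.foldl_cons, stepA, hc, if_true, ih, gRef, hg, Bool.false_eq_true, if_false]
      cases hrec : gRef xs with
      | nil => simp [prep]
      | cons h t => simp [prep]

-- break positions of l starting at index s
def bks : List (Int × Int) → Int → List Int
  | [], _ => []
  | x :: xs, s => if x.1 == -1 || x.2 == -1 then s :: bks xs (s + 1) else bks xs (s + 1)

lemma breaks_eq_bks (l : List (Int × Int)) :
    ∀ s, ((PySem.List.enumerate l s).filter (fun p => p.2.1 == -1 || p.2.2 == -1)).map (·.1)
      = bks l s := by
  induction l with
  | nil => intro s; simp [PySem.List.enumerate_nil, bks]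
  | cons x xs ih =>
    intro s
    rw [PySem.List.enumerate_cons]
    by_cases h : (x.1 == -1 || x.2 == -1) = true
    · simp [h, bks, ih]
    · simp [h, bks, ih]

lemma bks_succ (l : List (Int × Int)) :
    ∀ s, bks l (s + 1) = (bks l s).map (· + 1) := by
  induction l with
  | nil => intro s; simp [bks]
  | cons x xs ih =>
    intro s
    by_cases h : (x.1 == -1 || x.2 == -1) = true <;> simp [bks, h, ih]

lemma mem_bks_le (l : List (Int × Int)) :
    ∀ s b, b ∈ bks l s → s ≤ b := by
  induction l with
  | nil => intro s b h; simp [bks] at h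
  | cons x xs ih =>
    intro s b h
    by_cases hc : (x.1 == -1 || x.2 == -1) = true <;> simp [bks, hc] at h
    · rcases h with h | h
      · omega
      · have := ih (s + 1) b h; omega
    · have := ih (s + 1) b h; omega

lemma length_gRef_eq (l : List (Int × Int)) :
    ∀ s, (gRef l).length = (bks l s).length := by
  induction l with
  | nil => intro s; simp [gRef, bks]
  | cons x xs ih =>
    intro s
    by_cases h : (x.1 == -1 || x.2 == -1) = true
    · simp [gRef, bks, h, ih (s + 1)]
    · simp only [gRef, h, Bool.false_eq_true, if_false, bks]
      cases hrec : gRef xs with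
      | nil => rw [← ih (s + 1)]; simp [hrec]
      | cons hh tt => rw [← ih (s + 1)]; simp [hrec]

lemma slice_shift (x : Int × Int) (l : List (Int × Int)) (s b : Int)
    (hs : 0 ≤ s) (hb : 0 ≤ b) :
    PySem.List.slice (x :: l) (some (s + 1)) (some (b + 1)) = PySem.List.slice l (some s) (some b) := by
  rw [PySem.List.slice_toNat (x :: l) (by omega) (by omega), PySem.List.slice_toNat l hs hb]
  have h1 : (s + 1).toNat = s.toNat + 1 := by omega
  rw [h1]
  have h2 : (b + 1).toNat - (s.toNat + 1) = b.toNat - s.toNat := by omega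
  rw [h2, List.drop_succ_cons]

lemma foldB_shift (x : Int × Int) (l : List (Int × Int)) :
    ∀ (bs : List Int) (s : Int) (acc : List (List (Int × Int))),
      0 ≤ s → (∀ b ∈ bs, 0 ≤ b) →
      (bs.map (· + 1)).foldl (stepB (x :: l)) (s + 1, acc)
        = ((bs.foldl (stepB l) (s, acc)).1 + 1, (bs.foldl (stepB l) (s, acc)).2) := by
  intro bs
  induction bs with
  | nil => intro s acc _ _; simp
  | cons b bs' ih =>
    intro s acc hs hmem
    have hb : 0 ≤ b := hmem b (by simp)
    simp only [List.map_cons, List.foldl_cons, stepB, slice_shift x l s b hs hb]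
    exact ih (b + 1) _ (by omega) (fun c hc => hmem c (by simp [hc]))

lemma foldB_acc (l : List (Int × Int)) :
    ∀ (bs : List Int) (s : Int) (acc : List (List (Int × Int))),
      (bs.foldl (stepB l) (s, acc)).2 = acc ++ (bs.foldl (stepB l) (s, [])).2 := by
  intro bs
  induction bs with
  | nil => intro s acc; simp
  | cons b bs' ih =>
    intro s acc
    simp only [List.foldl_cons, stepB, List.nil_append]
    rw [ih (b + 1) (acc ++ _), ih (b + 1) [_]]
    simp

lemma foldB_eq_gRef (l : List (Int × Int)) :
    ((bks l 0).foldl (stepB l) (0, [])).2 = gRef l := by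
  induction l with
  | nil => simp [bks, gRef]
  | cons x xs ih =>
    have hmem : ∀ b ∈ bks xs 0, 0 ≤ b := fun b hb => mem_bks_le xs 0 b hb
    by_cases h : (x.1 == -1 || x.2 == -1) = true
    · have hbk : bks (x :: xs) 0 = 0 :: (bks xs 0).map (· + 1) := by
        simp only [bks, h, if_true]; rw [bks_succ]
      have e1 : PySem.List.slice (x :: xs) (some 0) (some 0) = [] := by
        rw [PySem.List.slice_toNat (x :: xs) (le_refl 0) (le_refl 0)]; simp
      rw [hbk]
      simp only [List.foldl_cons, stepB, List.nil_append]
      rw [foldB_shift x xs (bks xs 0) 0 [PySem.List.slice (x :: xs) (some 0) (some 0)]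
        (le_refl 0) hmem]
      rw [foldB_acc xs (bks xs 0) 0 [PySem.List.slice (x :: xs) (some 0) (some 0)]]
      rw [ih, e1]
      simp [gRef, h]
    · have hbk : bks (x :: xs) 0 = (bks xs 0).map (· + 1) := by
        simp only [bks, h, Bool.false_eq_true, if_false]; rw [bks_succ]
      cases hbs : bks xs 0 with
      | nil =>
        rw [hbk, hbs]
        have hlen : (gRef (x :: xs)).length = 0 := by
          rw [length_gRef_eq (x :: xs) 0, hbk, hbs]; simp
        rw [List.length_eq_zero_iff] at hlen
        simp [hlen]
      | cons b bs' =>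
        have hb : 0 ≤ b := hmem b (by rw [hbs]; simp)
        have hmem' : ∀ c ∈ bs', 0 ≤ c := fun c hc => by
          have := hmem c (by rw [hbs]; simp [hc]); omega
        have hsl : PySem.List.slice (x :: xs) (some 0) (some (b + 1))
            = x :: PySem.List.slice xs (some 0) (some b) := by
          rw [PySem.List.slice_toNat (x :: xs) (le_refl 0) (by omega),
              PySem.List.slice_toNat xs (le_refl 0) hb]
          have h2 : (b + 1).toNat - (0 : Int).toNat = (b.toNat - (0 : Int).toNat) + 1 := by omega
          rw [h2]
          simp [List.take_succ_cons]
        have ih' : PySem.List.slice xs (some 0) (some b)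
            :: (bs'.foldl (stepB xs) (b + 1, [])).2 = gRef xs := by
          rw [hbs] at ih
          simp only [List.foldl_cons, stepB, List.nil_append] at ih
          rw [foldB_acc xs bs' (b + 1)] at ih
          simpa using ih
        rw [hbk, hbs]
        simp only [List.map_cons, List.foldl_cons, stepB, List.nil_append]
        rw [hsl]
        rw [foldB_shift x xs bs' (b + 1) [x :: PySem.List.slice xs (some 0) (some b)]
          (by omega) hmem']
        rw [foldB_acc xs bs' (b + 1) [x :: PySem.List.slice xs (some 0) (some b)]]
        simp only [gRef, h, Bool.false_eq_true, if_false, ← ih']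
        simp

lemma cutLists_eq_gRef (l : List (Int × Int)) : cutLists l = gRef l := by
  unfold cutLists
  rw [foldlA_eq l [] [], prep_nil]
  simp

lemma cutLists_alt_eq_gRef (l : List (Int × Int)) : cutLists_alt l = gRef l := by
  unfold cutLists_alt
  rw [breaks_eq_bks l 0]
  exact foldB_eq_gRef l

-- ===== VERDICT (by name: the statement is the Claim_ definition above) =====
theorem cutLists_spec : Claim_equal_cutLists := by
  intro liste _
  unfold Spec_cutLists
  rw [cutLists_eq_gRef, cutLists_alt_eq_gRef]
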